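-- pv_equiv track=rewrite | github.com/ggm1207/Algorithms | 3.others/naver_songpyun.py | solution
-- ===== SOURCE A (Python) =====
-- from copy import deepcopy
-- from collections import defaultdict
--
-- def return_depth(re_arr, next_list, prev_list):
--   depth = 0
--   start = [n for n in re_arr if not prev_list[n] and n in re_arr]
--   dd = defaultdict(list)
--   while(start):
--     nexts = []
--     for s in start:
--       for n in next_list[s]:
--         if n in re_arr:
--           nexts.append(n)
--       dd[depth].append(s)
--     depth += 1
--
--     nexts = list(set(nexts))
--     start = nexts[:]
--
--   return dd
--
-- def return_arr(prev_list, k):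
--   s = set()
--   r = set()
--   for p in prev_list[k-1]:
--     s.add(p)
--
--   while(s != r):
--     r = deepcopy(s)
--     for pp in list(s):
--       for p in prev_list[pp]:
--         s.add(p)
--   return list(s)
--
-- def solution(cook_times, order, k):
--   answer = 0
--   cook_len = len(cook_times)
--   prev_list = defaultdict(list)
--   next_list = defaultdict(list)
--
--   for i in range(cook_len):
--     prev_list[i]
--     next_list[i]
--
--   for prev, cur in order:
--     prev_list[cur-1].append(prev-1)
--     next_list[prev-1].append(cur-1)
--
--   re_arr = return_arr(prev_list, k)
--   depth_list = return_depth(re_arr, next_list, prev_list)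
--
--   for _, v in depth_list.items():
--     answer += max([cook_times[val] for val in v])
--
--   answer += cook_times[k-1]
--
--   return [len(re_arr), answer]
-- ===== SOURCE B (Python) =====
-- from collections import defaultdict
--
-- def solution(cook_times, order, k):
--     prev_adj = defaultdict(list)
--     next_adj = defaultdict(list)
--     for p, c in order:
--         prev_adj[c - 1].append(p - 1)
--         next_adj[p - 1].append(c - 1)
--     # ancestor closure of dish k by frontier BFS over predecessor edges
--     visited = set(prev_adj[k - 1])
--     frontier = set(visited)
--     while frontier:
--         new = {p for x in frontier for p in prev_adj[x]} - visited
--         visited |= new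
--         frontier = new
--     # layered walk forward inside the ancestor set, summing the per-layer maximum
--     total = cook_times[k - 1]
--     layer = {u for u in visited if not prev_adj[u]}
--     while layer:
--         total += max(cook_times[u] for u in layer)
--         layer = {v for u in layer for v in next_adj[u] if v in visited}
--     return [len(visited), total]
-- ===== Notes on version B (the rewrite author's own statement) =====
-- stated objective: faster
-- what changed: B replaces A's deepcopy-until-stable fixpoint for the ancestor set and its O(V) list-membership scans by a frontier BFS over the predecessor adjacency with set membership, and accumulates the layered max-sum directly with set frontiers instead of building a depth->list defaultdict and summing over its items afterwards.
import Mathlib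
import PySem

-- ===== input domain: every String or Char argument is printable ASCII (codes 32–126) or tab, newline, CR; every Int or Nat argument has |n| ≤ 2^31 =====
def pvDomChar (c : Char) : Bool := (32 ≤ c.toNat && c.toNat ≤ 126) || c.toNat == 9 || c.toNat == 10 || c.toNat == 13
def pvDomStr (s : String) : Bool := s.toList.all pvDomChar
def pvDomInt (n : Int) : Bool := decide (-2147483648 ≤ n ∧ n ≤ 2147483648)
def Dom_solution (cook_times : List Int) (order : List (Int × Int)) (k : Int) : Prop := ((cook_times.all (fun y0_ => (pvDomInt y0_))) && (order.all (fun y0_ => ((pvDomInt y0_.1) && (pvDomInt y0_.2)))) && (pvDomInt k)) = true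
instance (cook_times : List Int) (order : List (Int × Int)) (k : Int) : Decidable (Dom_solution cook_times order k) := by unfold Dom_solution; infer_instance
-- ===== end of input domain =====

-- B replaces A's deepcopy fixpoint + list scans by frontier BFS with sets over adjacency arrays (objective: faster).

-- ===== PORT A =====
-- inner while of return_arr; fuel bounds the while loop (order.length + 2 iterations always
-- suffice on the inputs Pre_solution admits, where the Python loops terminate)
def arrLoopA (prev_list : PySem.Dict Int (List Int)) : Nat → PySem.Set Int → PySem.Set Int → PySem.Set Int
  | 0, s, _ => s
  | fuel + 1, s, r =>
    if PySem.Set.equal s r then s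
    else arrLoopA prev_list fuel
      (s.foldl (fun s2 pp => (prev_list.getD pp []).foldl PySem.Set.add s2) s) s

-- return_arr(prev_list, k)
def returnArr (prev_list : PySem.Dict Int (List Int)) (k : Int) (fuel : Nat) : List Int :=
  let s := (prev_list.getD (k - 1) []).foldl PySem.Set.add PySem.Set.empty
  arrLoopA prev_list fuel s PySem.Set.empty

-- while loop of return_depth (same fuel discipline as arrLoopA)
def depthLoopA (re_arr : List Int) (next_list : PySem.Dict Int (List Int)) :
    Nat → List Int → PySem.Dict Int (List Int) → Int → PySem.Dict Int (List Int)
  | 0, _, dd, _ => dd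
  | fuel + 1, start, dd, depth =>
    if start.isEmpty then dd
    else
      let step := start.foldl (fun (acc : List Int × PySem.Dict Int (List Int)) s =>
          ((next_list.getD s []).foldl (fun nexts nn => if re_arr.contains nn then nexts ++ [nn] else nexts) acc.1,
           acc.2.modify depth [] (· ++ [s]))) ([], dd)
      depthLoopA re_arr next_list fuel (PySem.Set.ofList step.1) step.2 (depth + 1)

-- return_depth(re_arr, next_list, prev_list)
def returnDepth (re_arr : List Int) (next_list prev_list : PySem.Dict Int (List Int)) (fuel : Nat) :
    PySem.Dict Int (List Int) :=
  let start := re_arr.filter (fun n => (prev_list.getD n []).isEmpty && re_arr.contains n)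
  depthLoopA re_arr next_list fuel start PySem.Dict.empty 0

def solution (cook_times : List Int) (order : List (Int × Int)) (k : Int) : List Int :=
  let cook_len := PySem.List.len cook_times
  -- for i in range(cook_len): prev_list[i]; next_list[i]  (defaultdict key touch)
  let dicts0 := (PySem.List.pyRange 0 cook_len 1).foldl
      (fun (d : PySem.Dict Int (List Int) × PySem.Dict Int (List Int)) i =>
        (d.1.setdefault i [], d.2.setdefault i [])) (PySem.Dict.empty, PySem.Dict.empty)
  -- for prev, cur in order: prev_list[cur-1].append(prev-1); next_list[prev-1].append(cur-1)
  let dicts := order.foldl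
      (fun (d : PySem.Dict Int (List Int) × PySem.Dict Int (List Int)) pc =>
        (d.1.modify (pc.2 - 1) [] (· ++ [pc.1 - 1]), d.2.modify (pc.1 - 1) [] (· ++ [pc.2 - 1]))) dicts0
  let re_arr := returnArr dicts.1 k (order.length + 2)
  let depth_list := returnDepth re_arr dicts.2 dicts.1 (order.length + 2)
  -- max([...]) is exact via getD 0: every recorded layer is nonempty
  let answer := depth_list.items.foldl (fun a kv =>
      a + (PySem.List.max? (kv.2.map (fun v => PySem.List.pyGetD cook_times v 0)) (fun x => x)).getD 0) 0
  let answer := answer + PySem.List.pyGetD cook_times (k - 1) 0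
  [PySem.List.len re_arr, answer]

-- ===== PORT B =====
-- ancestor closure: frontier BFS over predecessor edges (fuel bounds the while loop, as in port A)
def ancLoopB (prev_adj : PySem.Dict Int (List Int)) : Nat → PySem.Set Int → PySem.Set Int → PySem.Set Int
  | 0, visited, _ => visited
  | fuel + 1, visited, frontier =>
    if frontier.isEmpty then visited
    else
      let nw := PySem.Set.diff (PySem.Set.ofList (frontier.flatMap (fun x => prev_adj.getD x []))) visited
      ancLoopB prev_adj fuel (PySem.Set.union visited nw) nw

-- layered walk, accumulating the per-layer maximum directly
def layerLoopB (cook_times : List Int) (next_adj : PySem.Dict Int (List Int)) (visited : PySem.Set Int) :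
    Nat → Int → PySem.Set Int → Int
  | 0, total, _ => total
  | fuel + 1, total, layer =>
    if layer.isEmpty then total
    else
      let total' := total + (PySem.List.max? (layer.map (fun u => PySem.List.pyGetD cook_times u 0)) (fun x => x)).getD 0
      let layer' := PySem.Set.ofList ((layer.flatMap (fun u => next_adj.getD u [])).filter (fun v => visited.contains v))
      layerLoopB cook_times next_adj visited fuel total' layer'

def solution_alt (cook_times : List Int) (order : List (Int × Int)) (k : Int) : List Int :=
  let adjs := order.foldl
      (fun (d : PySem.Dict Int (List Int) × PySem.Dict Int (List Int)) pc =>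
        (d.1.modify (pc.2 - 1) [] (· ++ [pc.1 - 1]), d.2.modify (pc.1 - 1) [] (· ++ [pc.2 - 1])))
      (PySem.Dict.empty, PySem.Dict.empty)
  let seed := PySem.Set.ofList (adjs.1.getD (k - 1) [])
  let visited := ancLoopB adjs.1 (order.length + 2) seed seed
  let layer0 := PySem.Set.ofList (visited.filter (fun u => (adjs.1.getD u []).isEmpty))
  let total := layerLoopB cook_times adjs.2 visited (order.length + 2)
      (PySem.List.pyGetD cook_times (k - 1) 0) layer0
  [PySem.List.len visited, total]

-- ===== PRECONDITION & SPEC =====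
-- canonical 0-based predecessor/successor rows of the order graph (used by Pre_solution below)
def prevRow (order : List (Int × Int)) (u : Int) : List Int :=
  (order.filter (fun pc => pc.2 - 1 == u)).map (fun pc => pc.1 - 1)

def succRow (order : List (Int × Int)) (u : Int) : List Int :=
  (order.filter (fun pc => pc.1 - 1 == u)).map (fun pc => pc.2 - 1)

-- bounded iteration of a closure step: order.length rounds reach the full closure of the seed
-- (the standard decidable bound for the transitive closure of a relation with ≤ order.length edges)
def closeIter (g : Int → List Int) : Nat → PySem.Set Int → PySem.Set Int
  | 0, s => s
  | j + 1, s => closeIter g j (PySem.Set.update s (s.flatMap g))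

-- Pre_solution is exactly the set of inputs on which the Python A RETURNS: it excludes the inputs
-- where A raises IndexError (a dish id consumed by the layer sums, or k-1, indexed outside
-- [-len, len)) and the inputs where A's layering while-loop diverges (a dependency cycle inside
-- the ancestor set reachable from a source).  The equivalence proof itself holds for the total
-- fuel-bounded ports on every input and therefore does not consume these conjuncts; they are
-- needed so that the Python A terminates normally on every admitted input.
def Pre_solution (cook_times : List Int) (order : List (Int × Int)) (k : Int) : Prop :=
  let anc := closeIter (prevRow order) order.length (PySem.Set.ofList (prevRow order (k - 1)))
  let gR : Int → List Int := fun u => (succRow order u).filter (fun v => anc.contains v)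
  let R := closeIter gR order.length
      (PySem.Set.ofList (anc.filter (fun u => (prevRow order u).isEmpty)))
  PySem.Raise.InRange cook_times.length (k - 1) ∧
  (∀ u ∈ R, PySem.Raise.InRange cook_times.length u) ∧
  (∀ u ∈ R, u ∉ closeIter gR order.length (PySem.Set.ofList (gR u)))
instance (cook_times : List Int) (order : List (Int × Int)) (k : Int) : Decidable (Pre_solution cook_times order k) := by
  unfold Pre_solution; infer_instance

def pvWitness_solution : List Int × (List (Int × Int)) × Int := ([3, 5, 2], [(1, 3), (2, 3)], 3)

def Spec_solution (cook_times : List Int) (order : List (Int × Int)) (k : Int) (out : List Int) : Prop := out = solution_alt cook_times order k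
instance (cook_times : List Int) (order : List (Int × Int)) (k : Int) (out : List Int) : Decidable (Spec_solution cook_times order k out) := by unfold Spec_solution; infer_instance

-- ===== CLAIM (what is proved, stated in full; the proofs are below) =====
def Claim_equal_solution : Prop := ∀ (cook_times : List Int) (order : List (Int × Int)) (k : Int), Dom_solution cook_times order k → Pre_solution cook_times order k → Spec_solution cook_times order k (solution cook_times order k)

-- ===== LEMMAS AND PROOFS =====

-- helper notions for the proofs: the per-layer max summand and the sum A extracts from its depth dict
def maxCook (cook : List Int) (l : List Int) : Int :=
  (PySem.List.max? (l.map (fun v => PySem.List.pyGetD cook v 0)) (fun x => x)).getD 0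

def sumDD (cook : List Int) (dd : PySem.Dict Int (List Int)) : Int :=
  dd.items.foldl (fun a kv => a + maxCook cook kv.2) 0

-- the defaultdict-touch loop leaves every value-as-looked-up-with-default empty
lemma getD_setdefault_fold (l : List Int) (d : PySem.Dict Int (List Int))
    (h : ∀ x, d.getD x [] = []) : ∀ u, (l.foldl (fun d i => d.setdefault i []) d).getD u [] = [] := by
  induction l generalizing d with
  | nil => exact h
  | cons i t ih =>
    intro u
    rw [List.foldl_cons]
    apply ih
    intro x
    by_cases hc : d.contains i = true
    · simp [PySem.Dict.setdefault, hc, h]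
    · have hsd : d.setdefault i [] = d.insert i [] := by
        simp [PySem.Dict.setdefault, PySem.Dict.insert, hc]
      rw [hsd, PySem.Dict.getD_insert]
      split <;> simp [h]

-- A's append-into-defaultdict loop produces exactly the filtered/mapped row
lemma getD_fold_modify (key val : (Int × Int) → Int) (order : List (Int × Int))
    (d0 : PySem.Dict Int (List Int)) (h0 : ∀ x, d0.getD x [] = []) (u : Int) :
    (order.foldl (fun d pc => d.modify (key pc) [] (· ++ [val pc])) d0).getD u []
      = (order.filter (fun pc => key pc == u)).map val := by
  have h1 : order.foldl (fun d pc => d.modify (key pc) [] (· ++ [val pc])) d0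
      = (order.map (fun pc => (key pc, val pc))).foldl (fun d p => d.modify p.1 [] (· ++ [p.2])) d0 := by
    rw [List.foldl_map]
  rw [h1, PySem.Dict.getD_foldl_modify_append, h0, List.filter_map, List.map_map]
  simp [Function.comp_def]

-- fold of set-updates is one update with the flattened rows
lemma foldl_update_flatMap (g : Int → List Int) :
    ∀ (l : List Int) (s : PySem.Set Int),
      l.foldl (fun acc pp => PySem.Set.update acc (g pp)) s = PySem.Set.update s (l.flatMap g) := by
  intro l
  induction l with
  | nil => intro s; simp [PySem.Set.update]
  | cons pp t ih =>
    intro s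
    rw [List.foldl_cons, ih, List.flatMap_cons, PySem.Set.update_append]

-- the max of the mapped cook times only depends on the members
lemma maxCook_congr (cook : List Int) (l₁ l₂ : List Int)
    (h : ∀ x, x ∈ l₁ ↔ x ∈ l₂) (hne : l₁ ≠ []) :
    maxCook cook l₁ = maxCook cook l₂ := by
  have hne₂ : l₂ ≠ [] := by
    obtain ⟨a, ha⟩ := List.exists_mem_of_ne_nil l₁ hne
    exact List.ne_nil_of_mem ((h a).mp ha)
  set f : Int → Int := fun v => PySem.List.pyGetD cook v 0 with hf
  have h₁ : l₁.map f ≠ [] := by simpa using hne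
  have h₂ : l₂.map f ≠ [] := by simpa using hne₂
  obtain ⟨m₁, hm₁⟩ : ∃ m, PySem.List.max? (l₁.map f) (fun x => x) = some m := by
    rcases hh : PySem.List.max? (l₁.map f) (fun x => x) with _ | m
    · exact absurd (by rwa [PySem.List.max?_eq_none_iff] at hh) h₁
    · exact ⟨m, rfl⟩
  obtain ⟨m₂, hm₂⟩ : ∃ m, PySem.List.max? (l₂.map f) (fun x => x) = some m := by
    rcases hh : PySem.List.max? (l₂.map f) (fun x => x) with _ | m
    · exact absurd (by rwa [PySem.List.max?_eq_none_iff] at hh) h₂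
    · exact ⟨m, rfl⟩
  have key : ∀ (la lb : List Int) (ma mb : Int), (∀ x, x ∈ la ↔ x ∈ lb) →
      PySem.List.max? (la.map f) (fun x => x) = some ma →
      PySem.List.max? (lb.map f) (fun x => x) = some mb → ma ≤ mb := by
    intro la lb ma mb hab ha hb
    obtain ⟨u, hu, hfu⟩ := List.mem_map.mp (PySem.List.max?_mem ha)
    have hmem : f u ∈ lb.map f := List.mem_map.mpr ⟨u, (hab u).mp hu, rfl⟩
    have hle := PySem.List.max?_isMax hb _ hmem
    simp only at hle
    omega
  have hle₁ : m₁ ≤ m₂ := key l₁ l₂ m₁ m₂ h hm₁ hm₂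
  have hle₂ : m₂ ≤ m₁ := key l₂ l₁ m₂ m₁ (fun x => (h x).symm) hm₂ hm₁
  simp only [maxCook, ← hf, hm₁, hm₂, Option.getD_some]
  omega

lemma fold_modify_const :
    ∀ (l : List Int) (d : PySem.Dict Int (List Int)) (key : Int), l ≠ [] →
      l.foldl (fun d s => d.modify key [] (· ++ [s])) d = d.insert key (d.getD key [] ++ l) := by
  intro l
  induction l with
  | nil => intro d key h; exact absurd rfl h
  | cons s t ih =>
    intro d key _
    rw [List.foldl_cons]
    have hmod : d.modify key [] (· ++ [s]) = d.insert key (d.getD key [] ++ [s]) := rfl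
    cases t with
    | nil => simp [hmod]
    | cons b tt =>
      rw [hmod, ih _ key (by simp), PySem.Dict.getD_insert_self, PySem.Dict.insert_insert_self,
          List.append_assoc]
      rfl


lemma sumDD_insert (cook : List Int) (dd : PySem.Dict Int (List Int)) (depth : Int) (v : List Int)
    (h : dd.contains depth = false) :
    sumDD cook (dd.insert depth v) = sumDD cook dd + maxCook cook v := by
  unfold sumDD
  rw [PySem.Dict.items_insert_of_not_contains _ _ h, List.foldl_append]
  rfl

-- lockstep equivalence of A's deepcopy-fixpoint loop and B's frontier BFS: under the stated
-- invariants both compute, step for step, the same set of ancestors (up to order), with the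
-- exit conditions firing at the same iteration
lemma anc_lockstep (g : Int → List Int)
    (prevD prevB : PySem.Dict Int (List Int))
    (hA : ∀ u, prevD.getD u [] = g u)
    (hB : ∀ u, prevB.getD u [] = g u) :
    ∀ (fuel : Nat) (s r v f : PySem.Set Int),
      s.Nodup → v.Nodup →
      (∀ x, x ∈ s ↔ x ∈ v) →
      (∀ x ∈ f, x ∈ v) →
      (∀ x ∈ v, x ∉ f → ∀ p ∈ g x, p ∈ v) →
      ((PySem.Set.equal s r = true) ↔ f = []) →
      (arrLoopA prevD fuel s r).Nodup ∧
      (∀ x, x ∈ arrLoopA prevD fuel s r ↔ x ∈ ancLoopB prevB fuel v f) ∧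
      (ancLoopB prevB fuel v f).Nodup := by
  intro fuel
  induction fuel with
  | zero =>
    intro s r v f hs hv hsv _ _ _
    exact ⟨hs, by simpa [arrLoopA, ancLoopB] using hsv, hv⟩
  | succ fuel ih =>
    intro s r v f hs hv hsv hfv hinv hexit
    by_cases hf : f = []
    · have hse : PySem.Set.equal s r = true := hexit.mpr hf
      subst hf
      simp only [arrLoopA, ancLoopB, hse, if_true, List.isEmpty_nil]
      exact ⟨hs, hsv, hv⟩
    · have hse : PySem.Set.equal s r = false := by
        cases hq : PySem.Set.equal s r
        · rfl
        · exact absurd (hexit.mp hq) hf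
      have hfe : f.isEmpty = false := by simp [hf]
      have hbody : s.foldl (fun s2 pp => (prevD.getD pp []).foldl PySem.Set.add s2) s
          = PySem.Set.update s (s.flatMap g) := by
        have hfun : (fun (s2 : PySem.Set Int) pp => (prevD.getD pp []).foldl PySem.Set.add s2)
            = fun s2 pp => PySem.Set.update s2 (g pp) := by
          funext s2 pp; rw [hA]; rfl
        rw [hfun, foldl_update_flatMap]
      set s' := PySem.Set.update s (s.flatMap g) with hs'
      set nw := PySem.Set.diff (PySem.Set.ofList (f.flatMap (fun x => prevB.getD x []))) v with hnw
      set v' := PySem.Set.union v nw with hv'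
      have hms' : ∀ x, x ∈ s' ↔ x ∈ s ∨ ∃ pp ∈ s, x ∈ g pp := by
        intro x; rw [hs', PySem.Set.mem_update]; simp [List.mem_flatMap]
      have hrowf : ∀ pp ∈ f, prevB.getD pp [] = g pp := fun pp _ => hB pp
      have hmnw : ∀ x, x ∈ nw ↔ (∃ pp ∈ f, x ∈ g pp) ∧ x ∉ v := by
        intro x
        rw [hnw]
        simp only [PySem.Set.mem_diff, PySem.Set.mem_ofList, List.mem_flatMap]
        constructor
        · rintro ⟨⟨pp, hpp, hx⟩, hnv⟩; exact ⟨⟨pp, hpp, by rwa [← hrowf pp hpp]⟩, hnv⟩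
        · rintro ⟨⟨pp, hpp, hx⟩, hnv⟩; exact ⟨⟨pp, hpp, by rwa [hrowf pp hpp]⟩, hnv⟩
      have hmv' : ∀ x, x ∈ v' ↔ x ∈ v ∨ x ∈ nw := by
        intro x; rw [hv', PySem.Set.mem_union]
      have hsv' : ∀ x, x ∈ s' ↔ x ∈ v' := by
        intro x
        rw [hms' x, hmv' x]
        constructor
        · rintro (hx | ⟨pp, hpp, hx⟩)
          · exact Or.inl ((hsv x).mp hx)
          · have hppv := (hsv pp).mp hpp
            by_cases hpf : pp ∈ f
            · by_cases hxv : x ∈ v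
              · exact Or.inl hxv
              · exact Or.inr ((hmnw x).mpr ⟨⟨pp, hpf, hx⟩, hxv⟩)
            · exact Or.inl (hinv pp hppv hpf x hx)
        · rintro (hx | hx)
          · exact Or.inl ((hsv x).mpr hx)
          · obtain ⟨⟨pp, hpf, hx'⟩, _⟩ := (hmnw x).mp hx
            exact Or.inr ⟨pp, (hsv pp).mpr (hfv pp hpf), hx'⟩
      have hfv' : ∀ x ∈ nw, x ∈ v' := fun x hx => (hmv' x).mpr (Or.inr hx)
      have hinv' : ∀ x ∈ v', x ∉ nw → ∀ p ∈ g x, p ∈ v' := by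
        intro x hxv' hxnw p hp
        rcases (hmv' x).mp hxv' with hxv | hxnw2
        · by_cases hxf : x ∈ f
          · by_cases hpv : p ∈ v
            · exact (hmv' p).mpr (Or.inl hpv)
            · exact (hmv' p).mpr (Or.inr ((hmnw p).mpr ⟨⟨x, hxf, hp⟩, hpv⟩))
          · exact (hmv' p).mpr (Or.inl (hinv x hxv hxf p hp))
        · exact absurd hxnw2 hxnw
      have hs'N : s'.Nodup := by rw [hs']; exact PySem.Set.nodup_update s _ hs
      have hv'N : v'.Nodup := by rw [hv']; exact PySem.Set.nodup_union v _ hv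
      have hexit' : (PySem.Set.equal s' s = true) ↔ nw = [] := by
        rw [PySem.Set.equal_iff]
        constructor
        · intro hiff
          rw [List.eq_nil_iff_forall_not_mem]
          intro x hx
          obtain ⟨⟨pp, hpf, hxg⟩, hxv⟩ := (hmnw x).mp hx
          have hxs' : x ∈ s' := (hms' x).mpr (Or.inr ⟨pp, (hsv pp).mpr (hfv pp hpf), hxg⟩)
          exact hxv ((hsv x).mp ((hiff x).mp hxs'))
        · intro hnil x
          constructor
          · intro hx
            rcases (hms' x).mp hx with hx | ⟨pp, hpp, hxg⟩
            · exact hx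
            · have hppv := (hsv pp).mp hpp
              by_cases hpf : pp ∈ f
              · by_cases hxv : x ∈ v
                · exact (hsv x).mpr hxv
                · exact absurd ((hmnw x).mpr ⟨⟨pp, hpf, hxg⟩, hxv⟩) (by simp [hnil])
              · exact (hsv x).mpr (hinv pp hppv hpf x hxg)
          · intro hx; exact (hms' x).mpr (Or.inl hx)
      have hA1 : arrLoopA prevD (fuel + 1) s r = arrLoopA prevD fuel s' s := by
        simp only [arrLoopA, hse, Bool.false_eq_true, if_false, hbody]
      have hB1 : ancLoopB prevB (fuel + 1) v f = ancLoopB prevB fuel v' nw := by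
        simp only [ancLoopB, hfe, Bool.false_eq_true, if_false]
        rfl
      rw [hA1, hB1]
      exact ih s' s v' nw hs'N hv'N hsv' hfv' hinv' hexit'

-- lockstep equivalence of A's depth/defaultdict loop and B's direct set-frontier accumulation
lemma layer_lockstep (cook : List Int) (gN : Int → List Int)
    (nextD nextB : PySem.Dict Int (List Int))
    (hA : ∀ u, nextD.getD u [] = gN u)
    (hB : ∀ u, nextB.getD u [] = gN u)
    (re_arr visited : List Int)
    (hRV : ∀ x, x ∈ re_arr ↔ x ∈ visited) :
    ∀ (fuel : Nat) (start : List Int) (layer : PySem.Set Int)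
      (dd : PySem.Dict Int (List Int)) (depth : Int) (X : Int),
      start.Nodup →
      (∀ x, x ∈ start ↔ x ∈ layer) →
      (∀ x ∈ start, x ∈ visited) →
      (∀ j : Int, depth ≤ j → dd.contains j = false) →
      sumDD cook (depthLoopA re_arr nextD fuel start dd depth) + X
        = sumDD cook dd + layerLoopB cook nextB visited fuel X layer := by
  intro fuel
  induction fuel with
  | zero => intro start layer dd depth X _ _ _ _; simp [depthLoopA, layerLoopB]
  | succ fuel ih =>
    intro start layer dd depth X hsN hsl hsv hfresh
    by_cases hst : start = []
    · have hl : layer = [] := by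
        rw [List.eq_nil_iff_forall_not_mem]
        intro x hx
        rw [hst] at hsl
        simpa using (hsl x).mpr hx
      subst hst; subst hl
      simp [depthLoopA, layerLoopB]
    · have hle : layer.isEmpty = false := by
        obtain ⟨a, ha⟩ := List.exists_mem_of_ne_nil start hst
        have : layer ≠ [] := List.ne_nil_of_mem ((hsl a).mp ha)
        simp [this]
      have hste : start.isEmpty = false := by simp [hst]
      set p : Int → Bool := fun nn => re_arr.contains nn with hp
      set nexts := start.foldl (fun nx s => nx ++ (nextD.getD s []).filter p) ([] : List Int) with hnexts0
      set ddA := start.foldl (fun d s => d.modify depth [] (· ++ [s])) dd with hddA0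
      have hpair : start.foldl (fun (acc : List Int × PySem.Dict Int (List Int)) s =>
          ((nextD.getD s []).foldl (fun nexts nn => if re_arr.contains nn then nexts ++ [nn] else nexts) acc.1,
           acc.2.modify depth [] (· ++ [s]))) ([], dd) = (nexts, ddA) := by
        have hinner : (fun (acc : List Int × PySem.Dict Int (List Int)) s =>
            ((nextD.getD s []).foldl (fun nexts nn => if re_arr.contains nn then nexts ++ [nn] else nexts) acc.1,
             acc.2.modify depth [] (· ++ [s])))
            = fun acc s => (acc.1 ++ (nextD.getD s []).filter p, acc.2.modify depth [] (· ++ [s])) := by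
          funext acc s
          rw [PySem.List.foldl_append_if_eq_filter]
        rw [hinner, PySem.List.foldl_prod_mk
              (f := fun nx s => nx ++ (nextD.getD s []).filter p)
              (g := fun (d : PySem.Dict Int (List Int)) s => d.modify depth [] (· ++ [s]))]
      have hddA : ddA = dd.insert depth start := by
        rw [hddA0, fold_modify_const start dd depth hst,
            PySem.Dict.getD_of_not_contains dd [] (hfresh depth le_rfl)]
        simp
      have hnexts : nexts = start.flatMap (fun s => (gN s).filter p) := by
        rw [hnexts0]
        have hfun : (fun (nx : List Int) s => nx ++ (nextD.getD s []).filter p)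
            = fun nx s => nx ++ (gN s).filter p := by
          funext nx s; rw [hA]
        rw [hfun, PySem.List.foldl_append_eq_flatMap]
        simp
      set start' := PySem.Set.ofList nexts with hstart'
      set layer' := PySem.Set.ofList ((layer.flatMap (fun u => nextB.getD u [])).filter (fun v => visited.contains v)) with hlayer'
      have hms' : ∀ x, x ∈ start' ↔ ∃ s ∈ start, x ∈ gN s ∧ x ∈ re_arr := by
        intro x
        rw [hstart', PySem.Set.mem_ofList, hnexts]
        simp [List.mem_flatMap, List.mem_filter, hp]
      have hml' : ∀ x, x ∈ layer' ↔ ∃ u ∈ layer, x ∈ nextB.getD u [] ∧ x ∈ visited := by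
        intro x
        rw [hlayer', PySem.Set.mem_ofList]
        simp only [List.mem_filter, List.mem_flatMap, List.contains_iff_mem]
        tauto
      have hrows : ∀ u, nextB.getD u [] = gN u := hB
      have hsl' : ∀ x, x ∈ start' ↔ x ∈ layer' := by
        intro x
        rw [hms' x, hml' x]
        constructor
        · rintro ⟨u, hu, hx, hxr⟩
          exact ⟨u, (hsl u).mp hu, by rwa [hrows u], (hRV x).mp hxr⟩
        · rintro ⟨u, hu, hx, hxv⟩
          exact ⟨u, (hsl u).mpr hu, by rwa [← hrows u], (hRV x).mpr hxv⟩
      have hsv' : ∀ x ∈ start', x ∈ visited := by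
        intro x hx
        obtain ⟨u, hu, _, hxr⟩ := (hms' x).mp hx
        exact (hRV x).mp hxr
      have hfresh' : ∀ j : Int, depth + 1 ≤ j → (dd.insert depth start).contains j = false := by
        intro j hj
        rw [PySem.Dict.contains_insert]
        have h1 : (j == depth) = false := by simp; omega
        rw [h1, hfresh j (by omega)]
        rfl
      have hM : maxCook cook start = maxCook cook layer := maxCook_congr cook start layer hsl hst
      have hA1 : depthLoopA re_arr nextD (fuel + 1) start dd depth
          = depthLoopA re_arr nextD fuel start' (dd.insert depth start) (depth + 1) := by
        simp only [depthLoopA, hste, Bool.false_eq_true, if_false, hpair, ← hddA, hstart']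
      have hB1 : layerLoopB cook nextB visited (fuel + 1) X layer
          = layerLoopB cook nextB visited fuel (X + maxCook cook layer) layer' := by
        simp only [layerLoopB, hle, Bool.false_eq_true, if_false, hlayer']
        rfl
      rw [hA1, hB1]
      have hIH := ih start' layer' (dd.insert depth start) (depth + 1) (X + maxCook cook layer)
        (by rw [hstart']; exact PySem.Set.nodup_ofList _) hsl' hsv' hfresh'
      rw [sumDD_insert cook dd depth start (hfresh depth le_rfl), hM] at hIH
      omega

-- ===== VERDICT (by name: the statement is the Claim_ definition above) =====

theorem solution_spec : Claim_equal_solution := by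
  unfold Claim_equal_solution
  -- the two fuel-bounded ports agree on EVERY input; Pre_solution is needed only for the
  -- Python originals (see its comment), so the proof does not consume it
  intro cook_times order k _ _
  unfold Spec_solution
  set fuel := order.length + 2 with hfuel
  set dicts0 := (PySem.List.pyRange 0 (PySem.List.len cook_times) 1).foldl
      (fun (d : PySem.Dict Int (List Int) × PySem.Dict Int (List Int)) i =>
        (d.1.setdefault i [], d.2.setdefault i [])) (PySem.Dict.empty, PySem.Dict.empty) with hd0
  set dicts := order.foldl
      (fun (d : PySem.Dict Int (List Int) × PySem.Dict Int (List Int)) pc =>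
        (d.1.modify (pc.2 - 1) [] (· ++ [pc.1 - 1]), d.2.modify (pc.1 - 1) [] (· ++ [pc.2 - 1]))) dicts0 with hdct
  set re_arrA := returnArr dicts.1 k fuel with hrA
  set ddF := returnDepth re_arrA dicts.2 dicts.1 fuel with hddF
  set ansA := ddF.items.foldl (fun a kv =>
      a + (PySem.List.max? (kv.2.map (fun v => PySem.List.pyGetD cook_times v 0)) (fun x => x)).getD 0) 0 with hansA
  set adjs := order.foldl
      (fun (d : PySem.Dict Int (List Int) × PySem.Dict Int (List Int)) pc =>
        (d.1.modify (pc.2 - 1) [] (· ++ [pc.1 - 1]), d.2.modify (pc.1 - 1) [] (· ++ [pc.2 - 1])))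
      (PySem.Dict.empty, PySem.Dict.empty) with hadj
  set seed := PySem.Set.ofList (adjs.1.getD (k - 1) []) with hseed
  set visited := ancLoopB adjs.1 fuel seed seed with hvis
  set layer0 := PySem.Set.ofList (visited.filter (fun u => (adjs.1.getD u []).isEmpty)) with hlay0
  set totalB := layerLoopB cook_times adjs.2 visited fuel (PySem.List.pyGetD cook_times (k - 1) 0) layer0 with htot
  have hAe : solution cook_times order k
      = [PySem.List.len re_arrA, ansA + PySem.List.pyGetD cook_times (k - 1) 0] := rfl
  have hBe : solution_alt cook_times order k = [PySem.List.len visited, totalB] := rfl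
  -- split the paired folds into their components
  have hsplit0 : dicts0 = ((PySem.List.pyRange 0 (PySem.List.len cook_times) 1).foldl
        (fun (d : PySem.Dict Int (List Int)) i => d.setdefault i []) PySem.Dict.empty,
      (PySem.List.pyRange 0 (PySem.List.len cook_times) 1).foldl
        (fun (d : PySem.Dict Int (List Int)) i => d.setdefault i []) PySem.Dict.empty) := by
    rw [hd0]
    exact PySem.List.foldl_prod_mk (f := fun (d : PySem.Dict Int (List Int)) i => d.setdefault i [])
      (g := fun (d : PySem.Dict Int (List Int)) i => d.setdefault i []) _ _ _
  have hd01 : ∀ x, dicts0.1.getD x [] = [] := by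
    rw [hsplit0]
    exact getD_setdefault_fold _ _ (fun x => by simp [pysem])
  have hd02 : ∀ x, dicts0.2.getD x [] = [] := by
    rw [hsplit0]
    exact getD_setdefault_fold _ _ (fun x => by simp [pysem])
  have hsplitD : dicts = (order.foldl
        (fun (d : PySem.Dict Int (List Int)) (pc : Int × Int) => d.modify (pc.2 - 1) [] (· ++ [pc.1 - 1])) dicts0.1,
      order.foldl
        (fun (d : PySem.Dict Int (List Int)) (pc : Int × Int) => d.modify (pc.1 - 1) [] (· ++ [pc.2 - 1])) dicts0.2) := by
    rw [hdct]
    cases dicts0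
    exact PySem.List.foldl_prod_mk
      (f := fun (d : PySem.Dict Int (List Int)) (pc : Int × Int) => d.modify (pc.2 - 1) [] (· ++ [pc.1 - 1]))
      (g := fun (d : PySem.Dict Int (List Int)) (pc : Int × Int) => d.modify (pc.1 - 1) [] (· ++ [pc.2 - 1])) _ _ _
  have hPrevA : ∀ u, dicts.1.getD u [] = prevRow order u := by
    intro u
    rw [hsplitD]
    exact getD_fold_modify (fun pc => pc.2 - 1) (fun pc => pc.1 - 1) order dicts0.1 hd01 u
  have hNextA : ∀ u, dicts.2.getD u [] = succRow order u := by
    intro u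
    rw [hsplitD]
    exact getD_fold_modify (fun pc => pc.1 - 1) (fun pc => pc.2 - 1) order dicts0.2 hd02 u
  have hsplitB : adjs = (order.foldl
        (fun (d : PySem.Dict Int (List Int)) (pc : Int × Int) => d.modify (pc.2 - 1) [] (· ++ [pc.1 - 1])) PySem.Dict.empty,
      order.foldl
        (fun (d : PySem.Dict Int (List Int)) (pc : Int × Int) => d.modify (pc.1 - 1) [] (· ++ [pc.2 - 1])) PySem.Dict.empty) := by
    rw [hadj]
    exact PySem.List.foldl_prod_mk
      (f := fun (d : PySem.Dict Int (List Int)) (pc : Int × Int) => d.modify (pc.2 - 1) [] (· ++ [pc.1 - 1]))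
      (g := fun (d : PySem.Dict Int (List Int)) (pc : Int × Int) => d.modify (pc.1 - 1) [] (· ++ [pc.2 - 1])) _ _ _
  have hPrevB : ∀ u, adjs.1.getD u [] = prevRow order u := by
    intro u
    rw [hsplitB]
    exact getD_fold_modify (fun pc => pc.2 - 1) (fun pc => pc.1 - 1) order PySem.Dict.empty
      (fun x => by simp [pysem]) u
  have hNextB : ∀ u, adjs.2.getD u [] = succRow order u := by
    intro u
    rw [hsplitB]
    exact getD_fold_modify (fun pc => pc.1 - 1) (fun pc => pc.2 - 1) order PySem.Dict.empty
      (fun x => by simp [pysem]) u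
  -- the ancestor closures agree
  have hseedA : (dicts.1.getD (k - 1) []).foldl PySem.Set.add PySem.Set.empty = seed := by
    rw [hPrevA (k - 1), hseed, hPrevB (k - 1)]
    rfl
  have hreA : re_arrA = arrLoopA dicts.1 fuel seed PySem.Set.empty := by
    rw [hrA, returnArr, hseedA]
  have hexit0 : (PySem.Set.equal seed PySem.Set.empty = true) ↔ seed = [] := by
    rw [PySem.Set.equal_iff]
    constructor
    · intro h
      rw [List.eq_nil_iff_forall_not_mem]
      intro x hx
      have := (h x).mp hx
      simp [PySem.Set.empty] at this
    · intro h
      rw [h]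
      intro x
      rfl
  have hanc := anc_lockstep (prevRow order) dicts.1 adjs.1 hPrevA hPrevB
    fuel seed PySem.Set.empty seed seed
    (by rw [hseed]; exact PySem.Set.nodup_ofList _)
    (by rw [hseed]; exact PySem.Set.nodup_ofList _)
    (fun x => Iff.rfl) (fun x h => h)
    (fun x hxv hxf p hp => absurd hxv hxf) hexit0
  rw [← hreA, ← hvis] at hanc
  obtain ⟨hreN, hiff, hvN⟩ := hanc
  -- first components: same length
  have hlen : re_arrA.length = visited.length :=
    ((List.perm_ext_iff_of_nodup hreN hvN).mpr hiff).length_eq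
  -- depth stage
  set start0 := re_arrA.filter (fun nn => (dicts.1.getD nn []).isEmpty && re_arrA.contains nn) with hs0
  have hstart0 : ddF = depthLoopA re_arrA dicts.2 fuel start0 PySem.Dict.empty 0 := by
    rw [hddF, returnDepth, hs0]
  have hs0N : start0.Nodup := hreN.filter _
  have hmem0 : ∀ x, x ∈ start0 ↔ x ∈ layer0 := by
    intro x
    rw [hs0, hlay0, PySem.Set.mem_ofList]
    simp only [List.mem_filter, Bool.and_eq_true, List.isEmpty_iff]
    constructor
    · rintro ⟨hxr, hpe, -⟩
      refine ⟨(hiff x).mp hxr, ?_⟩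
      rw [hPrevB x, ← hPrevA x]
      exact hpe
    · rintro ⟨hxv, hpe⟩
      have hxr := (hiff x).mpr hxv
      refine ⟨hxr, ?_, by simpa using hxr⟩
      rw [hPrevA x, ← hPrevB x]
      exact hpe
  have hsub0 : ∀ x ∈ start0, x ∈ visited := by
    intro x hx
    rw [hs0] at hx
    exact (hiff x).mp (List.mem_of_mem_filter hx)
  have hlay := layer_lockstep cook_times (succRow order) dicts.2 adjs.2 hNextA hNextB
    re_arrA visited hiff fuel start0 layer0 PySem.Dict.empty 0
    (PySem.List.pyGetD cook_times (k - 1) 0) hs0N hmem0 hsub0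
    (fun j _ => by simp [pysem])
  rw [← hstart0] at hlay
  have hsum0 : sumDD cook_times PySem.Dict.empty = 0 := rfl
  have hansA2 : ansA = sumDD cook_times ddF := rfl
  rw [hsum0, zero_add] at hlay
  have hans : ansA + PySem.List.pyGetD cook_times (k - 1) 0 = totalB := by
    rw [hansA2, htot]
    exact hlay
  have hlenI : PySem.List.len re_arrA = PySem.List.len visited := by
    rw [PySem.List.len_eq, PySem.List.len_eq, hlen]
  rw [hAe, hBe, hans, hlenI]
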